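-- pv_equiv track=rewrite | github.com/job4sergey/algo_workout | informatics_msk_ru/ds_algs_course/graph/bfs/the02004_lcm/MccSolution.py | solution
-- ===== SOURCE A (Python) =====
-- from collections import deque
--
-- def solution(x, k, ds):
--     if x % k == 0:
--         return [x]
--
--     x0 = x
--     vis = {x % k: None}
--     q = deque([x % k])
--
--     y = None
--     while q:
--         x = q.popleft()
--         for d in ds:
--             x2 = (x * 10 + d) % k
--             if x2 in vis:
--                 continue
--
--             if x2 == 0:
--                 y = (x, d)
--                 q.clear()
--                 break
--
--             vis[x2] = (x, d)
--             q.append(x2)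
--
--     if y is None:
--         return None
--
--     ns = []
--     while y:
--         x, d = y
--         ns.append(d)
--         y = vis[x]
--
--     ns.append(x0)
--     ns.reverse()
--
--     return ns
-- ===== SOURCE B (Python) =====
-- from collections import deque
--
-- def solution(x, k, ds):
--     # BFS over residues mod k carrying the digit path in the queue
--     # (no parent map / reconstruction pass).
--     if x % k == 0:
--         return [x]
--     start = x % k
--     visited = {start}
--     q = deque([(start, [x])])
--     while q:
--         r, path = q.popleft()
--         for d in ds:
--             r2 = (r * 10 + d) % k
--             if r2 in visited:
--                 continue
--             if r2 == 0:
--                 return path + [d]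
--             visited.add(r2)
--             q.append((r2, path + [d]))
--     return None
-- ===== Notes on version B (the rewrite author's own statement) =====
-- stated objective: simpler
-- what changed: B keeps the BFS over residues mod k but carries the digit path inside each queue entry with a plain visited set, so the parent-pointer dict and the whole backward reconstruction/reverse phase of A disappear and B returns the answer directly at the moment the zero residue is reached.
import Mathlib
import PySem

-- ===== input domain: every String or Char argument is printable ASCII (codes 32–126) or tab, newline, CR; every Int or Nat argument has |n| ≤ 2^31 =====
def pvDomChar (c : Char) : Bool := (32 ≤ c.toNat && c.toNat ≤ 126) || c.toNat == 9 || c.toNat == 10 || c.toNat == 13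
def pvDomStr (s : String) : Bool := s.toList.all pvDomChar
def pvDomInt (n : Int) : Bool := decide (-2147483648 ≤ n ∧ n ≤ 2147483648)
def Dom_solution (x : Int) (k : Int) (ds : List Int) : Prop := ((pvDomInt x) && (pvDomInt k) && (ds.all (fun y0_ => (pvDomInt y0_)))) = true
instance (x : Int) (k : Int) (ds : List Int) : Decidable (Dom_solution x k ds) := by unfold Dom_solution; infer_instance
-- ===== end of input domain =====

-- B replaces A's parent-pointer dict + backward path reconstruction by a BFS that carries
-- the digit path inside each queue entry (objective: simpler; return value proved equal).


-- ===== PORT A =====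
-- inner 'for d in ds' loop: may mark/enqueue residues, or find the answer (then q is cleared)
def solA_step (k r : Int) : List Int → PySem.Dict Int (Option (Int × Int)) → List Int →
    PySem.Dict Int (Option (Int × Int)) × List Int × Option (Int × Int)
  | [], vis, q => (vis, q, none)
  | d :: rest, vis, q =>
    let x2 := PySem.Int.mod (r * 10 + d) k
    if (PySem.Dict.get? vis x2).isSome then solA_step k r rest vis q
    else if x2 = 0 then (vis, [], some (r, d))
    else solA_step k r rest (PySem.Dict.insert vis x2 (some (r, d))) (q ++ [x2])

-- outer 'while q' loop; fuel bounds the number of pops (each pop enqueues only unvisited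
-- residues, so k.natAbs + 1 pops always suffice; fuel exhaustion is unreachable)
def solA_loop (k : Int) (ds : List Int) : Nat → PySem.Dict Int (Option (Int × Int)) → List Int →
    Option (Int × Int) × PySem.Dict Int (Option (Int × Int))
  | _, vis, [] => (none, vis)
  | 0, vis, _ :: _ => (none, vis)
  | f + 1, vis, r :: q =>
    match solA_step k r ds vis q with
    | (vis', _, some y) => (some y, vis')   -- q was cleared, the while loop exits
    | (vis', q', none) => solA_loop k ds f vis' q'

-- 'while y' reconstruction loop; fuel = dict size bounds the parent-chain length;
-- vis[x] is ported as getD none: the key is always present when this loop runs in Python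
def solA_recon (vis : PySem.Dict Int (Option (Int × Int))) : Nat → Option (Int × Int) → List Int → List Int
  | _, none, ns => ns
  | 0, some _, ns => ns
  | f + 1, some (r, d), ns => solA_recon vis f ((PySem.Dict.get? vis r).getD none) (ns ++ [d])

def solution (x : Int) (k : Int) (ds : List Int) : Option (List Int) :=
  if PySem.Int.mod x k = 0 then some [x]
  else
    let x0 := x
    let r0 := PySem.Int.mod x k
    let vis0 : PySem.Dict Int (Option (Int × Int)) := PySem.Dict.insert PySem.Dict.empty r0 none
    match solA_loop k ds (k.natAbs + 1) vis0 [r0] with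
    | (none, _) => none
    | (some y, vis) => some (((solA_recon vis (PySem.Dict.size vis) (some y) []) ++ [x0]).reverse)

-- ===== PORT B =====
-- inner 'for d in ds' loop: extends the visited set / queue, or returns the finished path
def solB_step (k r : Int) (path : List Int) : List Int → PySem.Set Int → List (Int × List Int) →
    PySem.Set Int × List (Int × List Int) × Option (List Int)
  | [], vs, q => (vs, q, none)
  | d :: rest, vs, q =>
    let r2 := PySem.Int.mod (r * 10 + d) k
    if PySem.Set.contains vs r2 then solB_step k r path rest vs q
    else if r2 = 0 then (vs, q, some (path ++ [d]))
    else solB_step k r path rest (PySem.Set.add vs r2) (q ++ [(r2, path ++ [d])])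

def solB_loop (k : Int) (ds : List Int) : Nat → PySem.Set Int → List (Int × List Int) → Option (List Int)
  | _, _, [] => none
  | 0, _, _ :: _ => none
  | f + 1, vs, (r, path) :: q =>
    match solB_step k r path ds vs q with
    | (_, _, some res) => some res
    | (vs', q', none) => solB_loop k ds f vs' q'

def solution_alt (x : Int) (k : Int) (ds : List Int) : Option (List Int) :=
  if PySem.Int.mod x k = 0 then some [x]
  else
    let r0 := PySem.Int.mod x k
    solB_loop k ds (k.natAbs + 1) (PySem.Set.ofList [r0]) [(r0, [x])]

-- ===== PRECONDITION & SPEC =====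
-- Pre_ excludes only k = 0, where 'x % k' raises ZeroDivisionError in both A and B.
def Pre_solution (x : Int) (k : Int) (ds : List Int) : Prop := k ≠ 0
instance (x : Int) (k : Int) (ds : List Int) : Decidable (Pre_solution x k ds) := by unfold Pre_solution; infer_instance
def pvWitness_solution : Int × Int × List Int := (7, 3, [0, 1])
def Spec_solution (x : Int) (k : Int) (ds : List Int) (out : Option (List Int)) : Prop := out = solution_alt x k ds
instance (x : Int) (k : Int) (ds : List Int) (out : Option (List Int)) : Decidable (Spec_solution x k ds out) := by unfold Spec_solution; infer_instance

-- ===== CLAIM (what is proved, stated in full; the proofs are below) =====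
def Claim_equal_solution : Prop := ∀ (x : Int) (k : Int) (ds : List Int), Dom_solution x k ds → Pre_solution x k ds → Spec_solution x k ds (solution x k ds)

-- ===== LEMMAS AND PROOFS =====
-- parent chains in A's vis dict: the digit list A's reconstruction loop would produce
inductive pvChain (vis : PySem.Dict Int (Option (Int × Int))) : Option (Int × Int) → List Int → Prop
  | nil : pvChain vis none []
  | cons {r d : Int} {y : Option (Int × Int)} {cs : List Int} :
      PySem.Dict.get? vis r = some y → pvChain vis y cs → pvChain vis (some (r, d)) (d :: cs)

lemma pvChain_mono {vis vis' : PySem.Dict Int (Option (Int × Int))}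
    (hext : ∀ t v, PySem.Dict.get? vis t = some v → PySem.Dict.get? vis' t = some v)
    {y : Option (Int × Int)} {cs : List Int} (h : pvChain vis y cs) : pvChain vis' y cs := by
  induction h with
  | nil => exact pvChain.nil
  | cons hg _ ih => exact pvChain.cons (hext _ _ hg) ih

lemma solA_recon_of_chain {vis : PySem.Dict Int (Option (Int × Int))}
    {y : Option (Int × Int)} {cs : List Int} (h : pvChain vis y cs) :
    ∀ (f : Nat) (acc : List Int), cs.length ≤ f → solA_recon vis f y acc = acc ++ cs := by
  induction h with
  | nil => intro f acc _; cases f <;> simp [solA_recon]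
  | @cons r d y' cs' hg _ ih =>
      intro f acc hf
      cases f with
      | zero => simp at hf
      | succ f =>
          simp only [solA_recon, hg, Option.getD_some]
          rw [ih f (acc ++ [d]) (by simpa using hf)]
          simp

-- the relation between an entry r of A's queue and the matching entry of B's queue
def pvRel (x0 : Int) (vis : PySem.Dict Int (Option (Int × Int))) (r : Int) (p : Int × List Int) : Prop :=
  p.1 = r ∧ ∃ y cs, PySem.Dict.get? vis r = some y ∧ pvChain vis y cs ∧
    cs.length + 1 ≤ PySem.Dict.size vis ∧ p.2 = x0 :: cs.reverse

lemma pvRel_mono {x0 : Int} {vis vis' : PySem.Dict Int (Option (Int × Int))}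
    (hext : ∀ t v, PySem.Dict.get? vis t = some v → PySem.Dict.get? vis' t = some v)
    (hsz : PySem.Dict.size vis ≤ PySem.Dict.size vis')
    {r : Int} {p : Int × List Int} (h : pvRel x0 vis r p) : pvRel x0 vis' r p := by
  obtain ⟨h1, y, cs, hg, hch, hlen, hp⟩ := h
  exact ⟨h1, y, cs, hext _ _ hg, pvChain_mono hext hch, le_trans hlen hsz, hp⟩

-- one inner 'for d in ds' pass kept in lockstep
lemma step_equiv (k x0 : Int) (l : List Int) :
    ∀ (r : Int) (path cs : List Int) (y : Option (Int × Int))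
      (vis : PySem.Dict Int (Option (Int × Int))) (vs : PySem.Set Int)
      (qA : List Int) (qB : List (Int × List Int)),
    (∀ t : Int, (PySem.Dict.get? vis t).isSome = true ↔ t ∈ vs) →
    PySem.Dict.get? vis r = some y → pvChain vis y cs →
    cs.length + 1 ≤ PySem.Dict.size vis →
    path = x0 :: cs.reverse →
    List.Forall₂ (pvRel x0 vis) qA qB →
    (∃ vis' vs' qA' qB',
        solA_step k r l vis qA = (vis', qA', none) ∧
        solB_step k r path l vs qB = (vs', qB', none) ∧
        (∀ t : Int, (PySem.Dict.get? vis' t).isSome = true ↔ t ∈ vs') ∧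
        List.Forall₂ (pvRel x0 vis') qA' qB') ∨
    (∃ d vis' qA' vs' qB',
        solA_step k r l vis qA = (vis', qA', some (r, d)) ∧
        solB_step k r path l vs qB = (vs', qB', some (x0 :: cs.reverse ++ [d])) ∧
        pvChain vis' (some (r, d)) (d :: cs) ∧
        cs.length + 2 ≤ PySem.Dict.size vis' + 1) := by
  induction l with
  | nil =>
      intro r path cs y vis vs qA qB hmem hy hch hlen hpath hq
      exact Or.inl ⟨vis, vs, qA, qB, rfl, rfl, hmem, hq⟩
  | cons d rest ih =>
      intro r path cs y vis vs qA qB hmem hy hch hlen hpath hq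
      by_cases hv : (PySem.Dict.get? vis (PySem.Int.mod (r * 10 + d) k)).isSome = true
      · have hb : PySem.Set.contains vs (PySem.Int.mod (r * 10 + d) k) = true := by
          rw [PySem.Set.contains_iff]; exact (hmem _).mp hv
        have hstepA : solA_step k r (d :: rest) vis qA = solA_step k r rest vis qA := by
          simp only [solA_step]; rw [if_pos hv]
        have hstepB : solB_step k r path (d :: rest) vs qB = solB_step k r path rest vs qB := by
          simp only [solB_step]; rw [if_pos hb]
        rw [hstepA, hstepB]
        exact ih r path cs y vis vs qA qB hmem hy hch hlen hpath hq
      · have hb : ¬ PySem.Set.contains vs (PySem.Int.mod (r * 10 + d) k) = true := by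
          rw [PySem.Set.contains_iff]; intro hm; exact hv ((hmem _).mpr hm)
        by_cases h0 : PySem.Int.mod (r * 10 + d) k = 0
        · refine Or.inr ⟨d, vis, [], vs, qB, ?_, ?_, pvChain.cons hy hch, by omega⟩
          · simp only [solA_step]; rw [if_neg hv, if_pos h0]
          · simp only [solB_step]; rw [if_neg hb, if_pos h0, hpath]
        · -- new residue: both sides mark it and enqueue
          set x2 := PySem.Int.mod (r * 10 + d) k with hx2
          have hnone : PySem.Dict.get? vis x2 = none := by
            cases hg : PySem.Dict.get? vis x2 with
            | none => rfl
            | some v => exact absurd (by simp [hg]) hv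
          have hrx2 : r ≠ x2 := by intro h; rw [h, hnone] at hy; simp at hy
          have hext : ∀ t v, PySem.Dict.get? vis t = some v →
              PySem.Dict.get? (PySem.Dict.insert vis x2 (some (r, d))) t = some v := by
            intro t v hg
            have htx2 : t ≠ x2 := by intro h; rw [h, hnone] at hg; simp at hg
            rw [PySem.Dict.get?_insert, if_neg htx2]; exact hg
          have hszi : PySem.Dict.size (PySem.Dict.insert vis x2 (some (r, d))) =
              PySem.Dict.size vis + 1 := by
            rw [PySem.Dict.size_insert]
            have : PySem.Dict.contains vis x2 = false := by
              rw [PySem.Dict.contains_eq_isSome_get?, hnone]; rfl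
            simp [this]
          have hmem' : ∀ t : Int,
              (PySem.Dict.get? (PySem.Dict.insert vis x2 (some (r, d))) t).isSome = true ↔
                t ∈ PySem.Set.add vs x2 := by
            intro t
            rw [PySem.Set.mem_add]
            by_cases ht : t = x2
            · subst ht; rw [PySem.Dict.get?_insert, if_pos rfl]; simp
            · rw [PySem.Dict.get?_insert, if_neg ht]
              constructor
              · intro h; exact Or.inl ((hmem t).mp h)
              · rintro (h | h)
                · exact (hmem t).mpr h
                · exact absurd h ht
          have hy' : PySem.Dict.get? (PySem.Dict.insert vis x2 (some (r, d))) r = some y := hext _ _ hy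
          have hch' := pvChain_mono hext hch
          have hq' : List.Forall₂ (pvRel x0 (PySem.Dict.insert vis x2 (some (r, d))))
              (qA ++ [x2]) (qB ++ [(x2, path ++ [d])]) := by
            refine List.rel_append (hq.imp (fun _ _ => pvRel_mono hext (by omega))) ?_
            refine List.Forall₂.cons ⟨rfl, some (r, d), d :: cs, ?_, pvChain.cons hy' hch', ?_, ?_⟩
              List.Forall₂.nil
            · rw [PySem.Dict.get?_insert, if_pos rfl]
            · simpa [hszi] using Nat.add_le_add_right hlen 1
            · simp [hpath]
          have hstepA : solA_step k r (d :: rest) vis qA =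
              solA_step k r rest (PySem.Dict.insert vis x2 (some (r, d))) (qA ++ [x2]) := by
            simp only [solA_step]; rw [if_neg hv, if_neg h0]
          have hstepB : solB_step k r path (d :: rest) vs qB =
              solB_step k r path rest (PySem.Set.add vs x2) (qB ++ [(x2, path ++ [d])]) := by
            simp only [solB_step]; rw [if_neg hb, if_neg h0]
          rw [hstepA, hstepB]
          exact ih r path cs y (PySem.Dict.insert vis x2 (some (r, d))) (PySem.Set.add vs x2)
            (qA ++ [x2]) (qB ++ [(x2, path ++ [d])]) hmem' hy' hch' (by omega) hpath hq'


-- the two BFS while-loops stay in lockstep for any fuel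
lemma loop_equiv (k x0 : Int) (ds : List Int) :
    ∀ (f : Nat) (vis : PySem.Dict Int (Option (Int × Int))) (vs : PySem.Set Int)
      (qA : List Int) (qB : List (Int × List Int)),
    (∀ t : Int, (PySem.Dict.get? vis t).isSome = true ↔ t ∈ vs) →
    List.Forall₂ (pvRel x0 vis) qA qB →
    ((solA_loop k ds f vis qA).1 = none → solB_loop k ds f vs qB = none) ∧
    (∀ r d, (solA_loop k ds f vis qA).1 = some (r, d) →
      ∃ cs, solB_loop k ds f vs qB = some (x0 :: cs.reverse ++ [d]) ∧
        pvChain (solA_loop k ds f vis qA).2 (some (r, d)) (d :: cs) ∧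
        cs.length + 1 ≤ PySem.Dict.size (solA_loop k ds f vis qA).2) := by
  intro f
  induction f with
  | zero =>
      intro vis vs qA qB hmem hq
      cases hq with
      | nil => exact ⟨fun _ => rfl, fun r d h => by simp [solA_loop] at h⟩
      | cons hrel hq' => exact ⟨fun _ => rfl, fun r d h => by simp [solA_loop] at h⟩
  | succ f ihf =>
      intro vis vs qA qB hmem hq
      cases hq with
      | nil => exact ⟨fun _ => rfl, fun r d h => by simp [solA_loop] at h⟩
      | @cons r b qA' qB' hrel hq' =>
          obtain ⟨hp1, y, cs, hy, hch, hlen, hp2⟩ := hrel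
          have hbeq : b = (r, b.2) := by cases b; simp only at hp1; rw [hp1]
          rw [hbeq]
          set path := b.2 with hpathdef
          rcases step_equiv k x0 ds r path cs y vis vs qA' qB' hmem hy hch hlen hp2 hq' with
            ⟨vis', vs', qA'', qB'', hA, hB, hmem', hq''⟩ |
            ⟨d, vis', qA'', vs', qB'', hA, hB, hch', hlen'⟩
          · have eA : solA_loop k ds (f + 1) vis (r :: qA') = solA_loop k ds f vis' qA'' := by
              simp only [solA_loop]; rw [hA]
            have eB : solB_loop k ds (f + 1) vs ((r, path) :: qB') = solB_loop k ds f vs' qB'' := by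
              simp only [solB_loop]; rw [hB]
            rw [eA, eB]
            exact ihf vis' vs' qA'' qB'' hmem' hq''
          · have eA : solA_loop k ds (f + 1) vis (r :: qA') = (some (r, d), vis') := by
              simp only [solA_loop]; rw [hA]
            have eB : solB_loop k ds (f + 1) vs ((r, path) :: qB') =
                some (x0 :: cs.reverse ++ [d]) := by
              simp only [solB_loop]; rw [hB]
            rw [eA, eB]
            constructor
            · intro h; simp at h
            · intro r' d' h
              simp only at h
              obtain ⟨hr, hd⟩ : r' = r ∧ d' = d := by
                have := h; simp at this; exact ⟨this.1.symm, this.2.symm⟩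
              subst hr; subst hd
              refine ⟨cs, rfl, hch', ?_⟩
              show cs.length + 1 ≤ PySem.Dict.size vis'
              omega

-- ===== VERDICT (by name: the statement is the Claim_ definition above) =====
theorem solution_spec : Claim_equal_solution := by
  unfold Claim_equal_solution
  intro x k ds _ _
  unfold Spec_solution solution solution_alt
  by_cases h0 : PySem.Int.mod x k = 0
  · rw [if_pos h0, if_pos h0]
  · rw [if_neg h0, if_neg h0]
    simp only []
    set r0 := PySem.Int.mod x k with hr0
    set vis0 : PySem.Dict Int (Option (Int × Int)) :=
      PySem.Dict.insert PySem.Dict.empty r0 none with hvis0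
    have hmem0 : ∀ t : Int, (PySem.Dict.get? vis0 t).isSome = true ↔ t ∈ PySem.Set.ofList [r0] := by
      intro t
      rw [PySem.Set.mem_ofList, hvis0, PySem.Dict.get?_insert]
      by_cases ht : t = r0 <;> simp [ht, PySem.Dict.get?_empty]
    have hsz0 : PySem.Dict.size vis0 = 1 := by
      rw [hvis0, PySem.Dict.size_insert]
      simp [PySem.Dict.contains_empty, PySem.Dict.size_empty]
    have hq0 : List.Forall₂ (pvRel x vis0) [r0] [(r0, [x])] := by
      refine List.Forall₂.cons ⟨rfl, none, [], ?_, pvChain.nil, by simp [hsz0], rfl⟩ List.Forall₂.nil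
      rw [hvis0, PySem.Dict.get?_insert, if_pos rfl]
    have h := loop_equiv k x ds (k.natAbs + 1) vis0 (PySem.Set.ofList [r0]) [r0] [(r0, [x])]
      hmem0 hq0
    cases hres : solA_loop k ds (k.natAbs + 1) vis0 [r0] with
    | mk res visF =>
        cases res with
        | none =>
            rw [h.1 (by rw [hres])]
        | some y =>
            obtain ⟨r, d⟩ := y
            obtain ⟨cs, hB, hch, hlen⟩ := h.2 r d (by rw [hres])
            rw [hres] at hch hlen
            simp only at hch hlen
            rw [hB]
            show some ((solA_recon visF (PySem.Dict.size visF) (some (r, d)) []) ++ [x]).reverse = _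
            rw [solA_recon_of_chain hch (PySem.Dict.size visF) [] (by simpa using hlen)]
            simp
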